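-- pv_equiv track=rewrite | github.com/SmirnovVN/leetcode | aoc2024/10/solution.py | sum_up2
-- ===== SOURCE A (Python) =====
-- from collections import deque
--
-- directions = [(0, 1), (1, 0), (0, -1), (-1, 0)]
--
-- def sum_up2(nums):
--     m, n = len(nums), len(nums[0])
--     dp = [[0 for _ in range(n)] for _ in range(m)]
--     q = deque()
--     for i in range(m):
--         for j in range(n):
--             if nums[i][j] == 9:
--                 dp[i][j] = 1
--                 q.append((i, j, 9))
--     visited = set()
--     while q:
--         i, j, num = q.popleft()
--         if (i, j) in visited:
--             continue
--         visited.add((i, j))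
--         for di, dj in directions:
--             ni, nj, nnum = i + di, j + dj, num - 1
--             if 0 <= ni < m and 0 <= nj < n and nums[ni][nj] == nnum:
--                 dp[ni][nj] += dp[i][j]
--                 q.append((ni, nj, nnum))
--
--
--     result = 0
--     for i in range(m):
--         for j in range(n):
--             if nums[i][j] == 0:
--                 result += dp[i][j]
--
--     return result
-- ===== SOURCE B (Python) =====
-- directions = [(0, 1), (1, 0), (0, -1), (-1, 0)]
--
-- def sum_up2(nums):
--     # Level-synchronous dynamic programming: no queue, no visited set.
--     m, n = len(nums), len(nums[0])
--     dp = [[1 if nums[i][j] == 9 else 0 for j in range(n)] for i in range(m)]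
--     for v in range(8, -1, -1):
--         dp = [[sum(dp[i + di][j + dj] for di, dj in directions
--                    if 0 <= i + di < m and 0 <= j + dj < n and nums[i + di][j + dj] == v + 1)
--                if nums[i][j] == v else dp[i][j]
--                for j in range(n)] for i in range(m)]
--     return sum(dp[i][j] for i in range(m) for j in range(n) if nums[i][j] == 0)
-- ===== Notes on version B (the rewrite author's own statement) =====
-- stated objective: simpler
-- what changed: Replaced the multi-source BFS (deque + visited set + in-place dp increments propagating from the 9-cells) by a level-synchronous dynamic program: nine rounds v=8..0, each rebuilding the dp grid so that a v-cell's count is the sum of its (v+1)-neighbours' counts, then summing the counts at 0-cells; no queue and no visited set are needed.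
import Mathlib
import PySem

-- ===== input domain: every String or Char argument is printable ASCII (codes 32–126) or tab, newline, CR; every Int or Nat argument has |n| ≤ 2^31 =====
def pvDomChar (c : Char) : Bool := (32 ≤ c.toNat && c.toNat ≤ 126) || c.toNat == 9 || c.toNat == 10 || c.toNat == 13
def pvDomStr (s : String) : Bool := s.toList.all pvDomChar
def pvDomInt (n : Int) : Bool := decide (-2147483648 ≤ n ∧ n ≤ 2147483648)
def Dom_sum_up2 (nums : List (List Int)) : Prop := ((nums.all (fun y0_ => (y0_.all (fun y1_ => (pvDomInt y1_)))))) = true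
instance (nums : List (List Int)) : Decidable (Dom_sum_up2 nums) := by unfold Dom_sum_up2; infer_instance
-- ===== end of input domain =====

-- B replaces A's multi-source BFS (deque + visited set) by a level-synchronous DP over the
-- nine elevation levels 8..0; same return value on every input admitted by Pre_ (objective: simpler).

-- ===== PORT A =====
-- directions = [(0, 1), (1, 0), (0, -1), (-1, 0)]  (shared by both Pythons at module level)
def pvDirs : List (Int × Int) := [(0, 1), (1, 0), (0, -1), (-1, 0)]

-- nums[i][j]; total with default 0 — exact on in-range indices, which Pre_ guarantees for every access
def pvGv (nums : List (List Int)) (i j : Int) : Int :=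
  PySem.List.pyGetD (PySem.List.pyGetD nums i []) j 0

-- dp[i][j] read / write on the 2-D list dp (all accesses the programs make are in bounds)
def pvGet2 (dp : List (List Int)) (i j : Int) : Int :=
  PySem.List.pyGetD (PySem.List.pyGetD dp i []) j 0

def pvSet2 (dp : List (List Int)) (i j x : Int) : List (List Int) :=
  PySem.List.pySetD dp i (PySem.List.pySetD (PySem.List.pyGetD dp i []) j x)

-- body of A's 'for di, dj in directions' loop: conditionally increment dp[ni][nj] and append to q
def pvStep (nums : List (List Int)) (m n i j num : Int)
    (st : List (Int × Int × Int) × List (List Int)) (d : Int × Int) :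
    List (Int × Int × Int) × List (List Int) :=
  let ni := i + d.1
  let nj := j + d.2
  let nnum := num - 1
  if 0 ≤ ni ∧ ni < m ∧ 0 ≤ nj ∧ nj < n ∧ pvGv nums ni nj = nnum then
    (st.1 ++ [(ni, nj, nnum)], pvSet2 st.2 ni nj (pvGet2 st.2 ni nj + pvGet2 st.2 i j))
  else st

-- A's 'while q' loop (deque: popleft = head, append = ++ [·]); fuel only makes it structural,
-- sum_up2 passes enough fuel for the loop to run to emptiness on every input
def pvBfs (nums : List (List Int)) (m n : Int) :
    Nat → List (Int × Int × Int) → List (List Int) → PySem.Set (Int × Int) → List (List Int)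
  | 0, _, dp, _ => dp
  | _ + 1, [], dp, _ => dp
  | fuel + 1, (i, j, num) :: q, dp, vis =>
      if (i, j) ∈ vis then pvBfs nums m n fuel q dp vis
      else
        let st := pvDirs.foldl (pvStep nums m n i j num) (q, dp)
        pvBfs nums m n fuel st.1 st.2 (PySem.Set.add vis (i, j))

def sum_up2 (nums : List (List Int)) : Int :=
  let m := PySem.List.len nums
  let n := PySem.List.len (PySem.List.pyGetD nums 0 [])
  let dp0 : List (List Int) :=
    (PySem.List.pyRange 0 m 1).map (fun _ => (PySem.List.pyRange 0 n 1).map (fun _ => (0 : Int)))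
  let st :=
    (PySem.List.pyRange 0 m 1).foldl (fun st i =>
      (PySem.List.pyRange 0 n 1).foldl (fun st j =>
        if pvGv nums i j = 9 then (pvSet2 st.1 i j 1, st.2 ++ [(i, j, (9 : Int))]) else st) st)
      (dp0, ([] : List (Int × Int × Int)))
  let dp := pvBfs nums m n ((m * n).toNat * 4 ^ 10 + 1) st.2 st.1 PySem.Set.empty
  (PySem.List.pyRange 0 m 1).foldl (fun res i =>
    (PySem.List.pyRange 0 n 1).foldl (fun res j =>
      if pvGv nums i j = 0 then res + pvGet2 dp i j else res) res) 0

-- ===== PORT B =====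
-- one round of B's loop: rebuild dp so that each v-cell sums its (v+1)-neighbours' counts
def pvStepB (nums : List (List Int)) (m n : Int) (dp : List (List Int)) (v : Int) :
    List (List Int) :=
  (PySem.List.pyRange 0 m 1).map (fun i => (PySem.List.pyRange 0 n 1).map (fun j =>
    if pvGv nums i j = v then
      ((pvDirs.filter (fun d =>
          decide (0 ≤ i + d.1 ∧ i + d.1 < m ∧ 0 ≤ j + d.2 ∧ j + d.2 < n ∧
            pvGv nums (i + d.1) (j + d.2) = v + 1))).map
        (fun d => pvGet2 dp (i + d.1) (j + d.2))).sum
    else pvGet2 dp i j))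

def sum_up2_alt (nums : List (List Int)) : Int :=
  let m := PySem.List.len nums
  let n := PySem.List.len (PySem.List.pyGetD nums 0 [])
  let dp0 : List (List Int) :=
    (PySem.List.pyRange 0 m 1).map (fun i => (PySem.List.pyRange 0 n 1).map (fun j =>
      if pvGv nums i j = 9 then (1 : Int) else 0))
  let dp := (PySem.List.pyRange 8 (-1) (-1)).foldl (pvStepB nums m n) dp0
  ((PySem.List.pyRange 0 m 1).map (fun i =>
    ((PySem.List.pyRange 0 n 1).map (fun j =>
      if pvGv nums i j = 0 then pvGet2 dp i j else 0)).sum)).sum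

-- ===== PRECONDITION & SPEC =====
-- Pre_ excludes exactly the inputs where the Python raises IndexError: the empty outer list
-- (len(nums[0])) and grids where some row is shorter than row 0 (nums[i][j] for j < n);
-- both A and B raise on exactly these inputs.
def Pre_sum_up2 (nums : List (List Int)) : Prop :=
  nums ≠ [] ∧ ∀ r ∈ nums, nums.headI.length ≤ r.length
instance (nums : List (List Int)) : Decidable (Pre_sum_up2 nums) := by
  unfold Pre_sum_up2; infer_instance

def pvWitness_sum_up2 : List (List Int) := [[0, 1, 2, 3, 4, 5, 6, 7, 8, 9]]

def Spec_sum_up2 (nums : List (List Int)) (out : Int) : Prop := out = sum_up2_alt nums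
instance (nums : List (List Int)) (out : Int) : Decidable (Spec_sum_up2 nums out) := by
  unfold Spec_sum_up2; infer_instance

-- ===== CLAIM (what is proved, stated in full; the proofs are below) =====
def Claim_equal_sum_up2 : Prop :=
  ∀ (nums : List (List Int)), Dom_sum_up2 nums → Pre_sum_up2 nums →
    Spec_sum_up2 nums (sum_up2 nums)

-- ===== LEMMAS AND PROOFS =====

-- in-bounds predicate used throughout the proofs
def pvInBP (m n i j : Int) : Prop := 0 ≤ i ∧ i < m ∧ 0 ≤ j ∧ j < n

-- the common mathematical value: pvWays k i j = number of strictly +1 trails from (i,j)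
-- to a 9-cell, stabilised down to elevation 9-k
def pvWays (nums : List (List Int)) (m n : Int) : Nat → Int → Int → Int
  | 0, i, j => if pvGv nums i j = 9 then 1 else 0
  | k + 1, i, j =>
      if pvGv nums i j = 8 - (k : Int) then
        (pvDirs.map (fun d =>
          if 0 ≤ i + d.1 ∧ i + d.1 < m ∧ 0 ≤ j + d.2 ∧ j + d.2 < n ∧
              pvGv nums (i + d.1) (j + d.2) = 9 - (k : Int)
          then pvWays nums m n k (i + d.1) (j + d.2) else 0)).sum
      else pvWays nums m n k i j

def pvRect (m n : Int) (dp : List (List Int)) : Prop :=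
  dp.length = m.toNat ∧ ∀ r ∈ dp, r.length = n.toNat

-- ---- basic 2-D list lemmas ----
theorem pvGet2_nn (dp : List (List Int)) (i j : Int) (hi : 0 ≤ i) (hj : 0 ≤ j) :
    pvGet2 dp i j = (dp.getD i.toNat []).getD j.toNat 0 := by
  unfold pvGet2
  lift i to Nat using hi with a
  lift j to Nat using hj with b
  rw [PySem.List.pyGetD_natCast, PySem.List.pyGetD_natCast]
  simp

theorem pvSet2_nn (dp : List (List Int)) (i j x : Int) (hi : 0 ≤ i) (hj : 0 ≤ j) :
    pvSet2 dp i j x = dp.set i.toNat ((dp.getD i.toNat []).set j.toNat x) := by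
  unfold pvSet2
  rw [PySem.List.pySetD_of_nonneg _ _ hi, PySem.List.pySetD_of_nonneg _ _ hj]
  lift i to Nat using hi with a
  rw [PySem.List.pyGetD_natCast]
  simp

theorem pvGet2_pvSet2_ne (dp : List (List Int)) (a b i j x : Int)
    (ha : 0 ≤ a) (hb : 0 ≤ b) (hi : 0 ≤ i) (hj : 0 ≤ j) (h : ¬(i = a ∧ j = b)) :
    pvGet2 (pvSet2 dp a b x) i j = pvGet2 dp i j := by
  rw [pvSet2_nn dp a b x ha hb, pvGet2_nn _ i j hi hj, pvGet2_nn dp i j hi hj]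
  simp only [List.getD_eq_getElem?_getD]
  by_cases hia : i = a
  · subst hia
    have hjb : j.toNat ≠ b.toNat := by omega
    by_cases hlen : i.toNat < dp.length
    · rw [List.getElem?_set_self hlen]
      simp [List.getElem?_set_ne (Ne.symm hjb)]
    · rw [List.set_eq_of_length_le (by omega)]
  · have hne : i.toNat ≠ a.toNat := by omega
    rw [List.getElem?_set_ne (Ne.symm hne)]

theorem pvGet2_pvSet2_eq (dp : List (List Int)) (a b x : Int)
    (ha : 0 ≤ a) (hb : 0 ≤ b) (hlen : a.toNat < dp.length)
    (hrow : b.toNat < (dp.getD a.toNat []).length) :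
    pvGet2 (pvSet2 dp a b x) a b = x := by
  rw [pvSet2_nn dp a b x ha hb, pvGet2_nn _ a b ha hb]
  simp only [List.getD_eq_getElem?_getD]
  rw [List.getElem?_set_self hlen]
  simp [List.getElem?_set_self (by simpa [List.getD_eq_getElem?_getD] using hrow)]

theorem pvRect_pvSet2 (m n : Int) (dp : List (List Int)) (a b x : Int)
    (ha : 0 ≤ a) (hb : 0 ≤ b) (hr : pvRect m n dp) :
    pvRect m n (pvSet2 dp a b x) := by
  rw [pvSet2_nn dp a b x ha hb]
  by_cases hlen : a.toNat < dp.length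
  · refine ⟨by simpa using hr.1, fun r hrm => ?_⟩
    rcases List.mem_or_eq_of_mem_set hrm with h | h
    · exact hr.2 r h
    · subst h
      simp only [List.length_set]
      rw [List.getD_eq_getElem _ _ hlen]
      exact hr.2 _ (List.getElem_mem hlen)
  · rw [List.set_eq_of_length_le (by omega)]
    exact hr

theorem pvGet2_grid (m n : Int) (f : Int → Int → Int) (i j : Int)
    (hi : 0 ≤ i) (him : i < m) (hj : 0 ≤ j) (hjn : j < n) :
    pvGet2 ((PySem.List.pyRange 0 m 1).map (fun i => (PySem.List.pyRange 0 n 1).map (f i))) i j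
      = f i j := by
  unfold pvGet2
  rw [PySem.List.pyGetD_map_pyRange_of_nonneg _ _ _ _ hi (by simpa using him),
      PySem.List.pyGetD_map_pyRange_of_nonneg _ _ _ _ hj (by simpa using hjn)]

-- ---- the directions fold: queue and dp effects ----
theorem pvStep_queue (nums : List (List Int)) (m n i j num : Int) :
    ∀ (ds : List (Int × Int)) (q : List (Int × Int × Int)) (dp : List (List Int)),
      ds.foldl (pvStep nums m n i j num) (q, dp)
        = (q ++ (ds.foldl (pvStep nums m n i j num) ([], dp)).1,
           (ds.foldl (pvStep nums m n i j num) ([], dp)).2) := by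
  intro ds
  induction ds with
  | nil => intro q dp; simp
  | cons d ds ih =>
      intro q dp
      by_cases hg : 0 ≤ i + d.1 ∧ i + d.1 < m ∧ 0 ≤ j + d.2 ∧ j + d.2 < n ∧
          pvGv nums (i + d.1) (j + d.2) = num - 1
      · simp only [List.foldl_cons, pvStep]
        simp only [if_pos hg, List.nil_append]
        rw [ih (q ++ [(i + d.1, j + d.2, num - 1)]) _, ih [(i + d.1, j + d.2, num - 1)] _]
        simp
      · simp only [List.foldl_cons, pvStep]
        simp only [if_neg hg]
        exact ih q dp

theorem pvStep_news_iff (nums : List (List Int)) (m n i j num : Int) :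
    ∀ (ds : List (Int × Int)) (q : List (Int × Int × Int)) (dp : List (List Int))
      (e : Int × Int × Int),
      e ∈ (ds.foldl (pvStep nums m n i j num) (q, dp)).1 ↔
        e ∈ q ∨ ∃ d ∈ ds, (0 ≤ i + d.1 ∧ i + d.1 < m ∧ 0 ≤ j + d.2 ∧ j + d.2 < n ∧
          pvGv nums (i + d.1) (j + d.2) = num - 1) ∧ e = (i + d.1, j + d.2, num - 1) := by
  intro ds
  induction ds with
  | nil => intro q dp e; simp
  | cons d ds ih =>
      intro q dp e
      by_cases hg : 0 ≤ i + d.1 ∧ i + d.1 < m ∧ 0 ≤ j + d.2 ∧ j + d.2 < n ∧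
          pvGv nums (i + d.1) (j + d.2) = num - 1
      · simp only [List.foldl_cons, pvStep]
        simp only [if_pos hg, List.nil_append]
        rw [ih]
        simp only [List.mem_append, List.mem_cons, List.not_mem_nil, or_false]
        constructor
        · rintro ((h | h) | ⟨d', hd', hg', he⟩)
          · exact Or.inl h
          · exact Or.inr ⟨d, Or.inl rfl, hg, h⟩
          · exact Or.inr ⟨d', Or.inr hd', hg', he⟩
        · rintro (h | ⟨d', (rfl | hd'), hg', he⟩)
          · exact Or.inl (Or.inl h)
          · exact Or.inl (Or.inr he)
          · exact Or.inr ⟨d', hd', hg', he⟩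
      · simp only [List.foldl_cons, pvStep]
        simp only [if_neg hg]
        rw [ih]
        simp only [List.mem_cons]
        constructor
        · rintro (h | ⟨d', hd', hg', he⟩)
          · exact Or.inl h
          · exact Or.inr ⟨d', Or.inr hd', hg', he⟩
        · rintro (h | ⟨d', (rfl | hd'), hg', he⟩)
          · exact Or.inl h
          · exact absurd hg' hg
          · exact Or.inr ⟨d', hd', hg', he⟩

theorem pvStep_news_len (nums : List (List Int)) (m n i j num : Int) :
    ∀ (ds : List (Int × Int)) (q : List (Int × Int × Int)) (dp : List (List Int)),
      (ds.foldl (pvStep nums m n i j num) (q, dp)).1.length ≤ q.length + ds.length := by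
  intro ds
  induction ds with
  | nil => intro q dp; simp
  | cons d ds ih =>
      intro q dp
      by_cases hg : 0 ≤ i + d.1 ∧ i + d.1 < m ∧ 0 ≤ j + d.2 ∧ j + d.2 < n ∧
          pvGv nums (i + d.1) (j + d.2) = num - 1
      · simp only [List.foldl_cons, pvStep]
        simp only [if_pos hg, List.nil_append]
        have h := ih (q ++ [(i + d.1, j + d.2, num - 1)]) (pvSet2 dp (i + d.1) (j + d.2)
          (pvGet2 dp (i + d.1) (j + d.2) + pvGet2 dp i j))
        simp at h ⊢
        omega
      · simp only [List.foldl_cons, pvStep]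
        simp only [if_neg hg]
        simp only [List.length_cons]
        exact (ih q dp).trans (by omega)

-- dp after the directions fold, pointwise (the dp component never reads the queue component)
theorem pvStep_dp (nums : List (List Int)) (m n i j num : Int)
    (hij : pvInBP m n i j) (hval : pvGv nums i j = num) :
    ∀ (ds : List (Int × Int)) (q : List (Int × Int × Int)) (dp : List (List Int)),
      pvRect m n dp →
      pvRect m n (ds.foldl (pvStep nums m n i j num) (q, dp)).2 ∧
      ∀ r c, pvInBP m n r c →
        pvGet2 (ds.foldl (pvStep nums m n i j num) (q, dp)).2 r c
          = pvGet2 dp r c + (ds.map (fun d =>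
              if (r = i + d.1 ∧ c = j + d.2) ∧ pvGv nums r c = num - 1
              then pvGet2 dp i j else 0)).sum := by
  obtain ⟨hi0, him, hj0, hjn⟩ := hij
  intro ds
  induction ds with
  | nil => intro q dp hrect; exact ⟨hrect, fun r c _ => by simp⟩
  | cons d ds ih =>
      intro q dp hrect
      by_cases hg : 0 ≤ i + d.1 ∧ i + d.1 < m ∧ 0 ≤ j + d.2 ∧ j + d.2 < n ∧
          pvGv nums (i + d.1) (j + d.2) = num - 1
      · simp only [List.foldl_cons, pvStep]
        simp only [if_pos hg, List.nil_append]
        obtain ⟨hni0, hnim, hnj0, hnjn, hnval⟩ := hg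
        set dp1 := pvSet2 dp (i + d.1) (j + d.2)
          (pvGet2 dp (i + d.1) (j + d.2) + pvGet2 dp i j) with hdp1
        have hrect1 : pvRect m n dp1 := pvRect_pvSet2 m n dp _ _ _ hni0 hnj0 hrect
        have htne : ¬(i = i + d.1 ∧ j = j + d.2) := by
          rintro ⟨h1, h2⟩
          rw [← h1, ← h2] at hnval
          omega
        have hgetij : pvGet2 dp1 i j = pvGet2 dp i j :=
          pvGet2_pvSet2_ne dp _ _ i j _ hni0 hnj0 hi0 hj0 htne
        obtain ⟨hrect2, hpt⟩ := ih (q ++ [(i + d.1, j + d.2, num - 1)]) dp1 hrect1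
        refine ⟨hrect2, fun r c hrc => ?_⟩
        obtain ⟨hr0, hrm, hc0, hcn⟩ := hrc
        rw [hpt r c ⟨hr0, hrm, hc0, hcn⟩]
        have hhead : pvGet2 dp1 r c = pvGet2 dp r c +
            (if (r = i + d.1 ∧ c = j + d.2) ∧ pvGv nums r c = num - 1
             then pvGet2 dp i j else 0) := by
          by_cases hrc_t : r = i + d.1 ∧ c = j + d.2
          · obtain ⟨rfl, rfl⟩ := hrc_t
            have h1 : (i + d.1).toNat < dp.length := by
              rw [hrect.1]; omega
            have h2 : (j + d.2).toNat < (dp.getD (i + d.1).toNat []).length := by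
              rw [hrect.2 _ (by rw [List.getD_eq_getElem _ _ h1]; exact List.getElem_mem h1)]
              omega
            rw [hdp1, pvGet2_pvSet2_eq dp _ _ _ hni0 hnj0 h1 h2]
            simp [hnval]
          · rw [hdp1, pvGet2_pvSet2_ne dp _ _ r c _ hni0 hnj0 hr0 hc0 hrc_t]
            simp [hrc_t]
        have hmaps : (ds.map (fun d =>
              if (r = i + d.1 ∧ c = j + d.2) ∧ pvGv nums r c = num - 1
              then pvGet2 dp1 i j else 0)).sum
            = (ds.map (fun d =>
              if (r = i + d.1 ∧ c = j + d.2) ∧ pvGv nums r c = num - 1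
              then pvGet2 dp i j else 0)).sum := by
          rw [hgetij]
        rw [hmaps, hhead]
        simp only [List.map_cons, List.sum_cons]
        ring
      · simp only [List.foldl_cons, pvStep]
        simp only [if_neg hg]
        obtain ⟨hrect2, hpt⟩ := ih q dp hrect
        refine ⟨hrect2, fun r c hrc => ?_⟩
        rw [hpt r c hrc]
        have : (if (r = i + d.1 ∧ c = j + d.2) ∧ pvGv nums r c = num - 1
                then pvGet2 dp i j else 0) = 0 := by
          rw [if_neg]
          rintro ⟨⟨rfl, rfl⟩, hv⟩
          obtain ⟨hr0, hrm, hc0, hcn⟩ := hrc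
          exact hg ⟨hr0, hrm, hc0, hcn, hv⟩
        simp only [List.map_cons, List.sum_cons, this]
        ring

-- dp cells whose value differs from num-1 are untouched by the directions fold (no rect needed)
theorem pvStep_dp_ne (nums : List (List Int)) (m n i j num : Int) (r c : Int)
    (hr0 : 0 ≤ r) (hc0 : 0 ≤ c) (hvne : pvGv nums r c ≠ num - 1) :
    ∀ (ds : List (Int × Int)) (q : List (Int × Int × Int)) (dp : List (List Int)),
      pvGet2 (ds.foldl (pvStep nums m n i j num) (q, dp)).2 r c = pvGet2 dp r c := by
  intro ds
  induction ds with
  | nil => intro q dp; rfl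
  | cons d ds ih =>
      intro q dp
      by_cases hg : 0 ≤ i + d.1 ∧ i + d.1 < m ∧ 0 ≤ j + d.2 ∧ j + d.2 < n ∧
          pvGv nums (i + d.1) (j + d.2) = num - 1
      · simp only [List.foldl_cons, pvStep]
        simp only [if_pos hg, List.nil_append]
        rw [ih]
        refine pvGet2_pvSet2_ne dp _ _ r c _ hg.1 hg.2.2.1 hr0 hc0 ?_
        rintro ⟨rfl, rfl⟩
        exact hvne hg.2.2.2.2
      · simp only [List.foldl_cons, pvStep]
        simp only [if_neg hg]
        exact ih q dp

-- ---- phase decomposition of the BFS loop ----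
def pvPhase (nums : List (List Int)) (m n : Int) :
    List (Int × Int × Int) → List (List Int) → PySem.Set (Int × Int) →
      List (Int × Int × Int) × List (List Int) × PySem.Set (Int × Int)
  | [], dp, vis => ([], dp, vis)
  | (i, j, num) :: Q, dp, vis =>
      if (i, j) ∈ vis then pvPhase nums m n Q dp vis
      else
        let st := pvDirs.foldl (pvStep nums m n i j num) ([], dp)
        let r := pvPhase nums m n Q st.2 (PySem.Set.add vis (i, j))
        (st.1 ++ r.1, r.2)

def pvProc : List (Int × Int × Int) → PySem.Set (Int × Int) → List (Int × Int)
  | [], _ => []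
  | (i, j, _) :: Q, vis =>
      if (i, j) ∈ vis then pvProc Q vis else (i, j) :: pvProc Q (PySem.Set.add vis (i, j))

theorem pvBfs_phase (nums : List (List Int)) (m n : Int) :
    ∀ (Q R : List (Int × Int × Int)) (dp : List (List Int)) (vis : PySem.Set (Int × Int))
      (fuel : Nat),
      pvBfs nums m n (fuel + Q.length) (Q ++ R) dp vis
        = pvBfs nums m n fuel (R ++ (pvPhase nums m n Q dp vis).1)
            (pvPhase nums m n Q dp vis).2.1 (pvPhase nums m n Q dp vis).2.2 := by
  intro Q
  induction Q with
  | nil => intro R dp vis fuel; simp [pvPhase]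
  | cons e Q ih =>
      obtain ⟨i, j, num⟩ := e
      intro R dp vis fuel
      simp only [List.length_cons]
      by_cases hv : (i, j) ∈ vis
      · simp only [List.cons_append, pvBfs, hv, if_pos, pvPhase]
        exact ih R dp vis fuel
      · simp only [List.cons_append, pvBfs, hv, if_neg, not_false_iff, pvPhase]
        rw [pvStep_queue nums m n i j num pvDirs (Q ++ R) dp]
        show pvBfs nums m n (fuel + Q.length)
            ((Q ++ R) ++ (pvDirs.foldl (pvStep nums m n i j num) ([], dp)).1)
            (pvDirs.foldl (pvStep nums m n i j num) ([], dp)).2 (PySem.Set.add vis (i, j))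
          = pvBfs nums m n fuel
              (R ++ ((pvDirs.foldl (pvStep nums m n i j num) ([], dp)).1 ++
                (pvPhase nums m n Q (pvDirs.foldl (pvStep nums m n i j num) ([], dp)).2
                  (PySem.Set.add vis (i, j))).1))
              (pvPhase nums m n Q (pvDirs.foldl (pvStep nums m n i j num) ([], dp)).2
                (PySem.Set.add vis (i, j))).2.1
              (pvPhase nums m n Q (pvDirs.foldl (pvStep nums m n i j num) ([], dp)).2
                (PySem.Set.add vis (i, j))).2.2
        rw [List.append_assoc,
            ih (R ++ (pvDirs.foldl (pvStep nums m n i j num) ([], dp)).1) _ _ fuel,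
            List.append_assoc]

theorem pvBfs_high (nums : List (List Int)) (m n : Int) (v : Int) :
    ∀ (fuel : Nat) (Q : List (Int × Int × Int)) (dp : List (List Int))
      (vis : PySem.Set (Int × Int)),
      (∀ e ∈ Q, e.2.2 ≤ v) →
      ∀ r c, pvInBP m n r c → v ≤ pvGv nums r c →
        pvGet2 (pvBfs nums m n fuel Q dp vis) r c = pvGet2 dp r c := by
  intro fuel
  induction fuel with
  | zero => intro Q dp vis _ r c _ _; rfl
  | succ fuel ih =>
      intro Q dp vis hQ r c hrc hvc
      cases Q with
      | nil => rfl
      | cons e Q =>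
          obtain ⟨i, j, num⟩ := e
          by_cases hv : (i, j) ∈ vis
          · simp only [pvBfs, hv, if_pos]
            exact ih Q dp vis (fun e he => hQ e (List.mem_cons_of_mem _ he)) r c hrc hvc
          · simp only [pvBfs, hv, if_neg, not_false_iff]
            have hnum : num ≤ v := hQ (i, j, num) List.mem_cons_self
            have hdp : pvGet2 ((pvDirs.foldl (pvStep nums m n i j num) (Q, dp)).2) r c
                = pvGet2 dp r c := by
              refine pvStep_dp_ne nums m n i j num r c hrc.1 hrc.2.2.1 (by omega) pvDirs Q dp
            rw [← hdp]
            refine ih _ _ _ ?_ r c hrc hvc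
            intro e he
            rw [pvStep_news_iff nums m n i j num pvDirs Q dp e] at he
            rcases he with he | ⟨d, _, _, rfl⟩
            · exact hQ e (List.mem_cons_of_mem _ he)
            · simp only
              omega

-- ---- adjacency ----
abbrev pvAdjE (a b : Int × Int) : Prop :=
  (b.1 = a.1 ∧ b.2 = a.2 + 1) ∨ (b.1 = a.1 + 1 ∧ b.2 = a.2) ∨
  (b.1 = a.1 ∧ b.2 = a.2 - 1) ∨ (b.1 = a.1 - 1 ∧ b.2 = a.2)

theorem pvSum4 (i j r c x : Int) (S : Prop) [Decidable S] :
    (pvDirs.map (fun d => if (r = i + d.1 ∧ c = j + d.2) ∧ S then x else 0)).sum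
      = if pvAdjE (i, j) (r, c) ∧ S then x else 0 := by
  by_cases hS : S <;> simp [hS, pvDirs] <;> split_ifs <;> omega

-- ---- the processed cells of a phase ----
theorem pvProc_mem : ∀ (Q : List (Int × Int × Int)) (vis : PySem.Set (Int × Int)) (c : Int × Int),
    c ∈ pvProc Q vis ↔ (∃ num, (c.1, c.2, num) ∈ Q) ∧ c ∉ vis := by
  intro Q
  induction Q with
  | nil => intro vis c; simp [pvProc]
  | cons e Q ih =>
      obtain ⟨i, j, num⟩ := e
      intro vis c
      by_cases hv : (i, j) ∈ vis
      · simp only [pvProc, hv, if_pos]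
        rw [ih]
        by_cases hc : c = (i, j)
        · subst hc; simp [hv]
        · simp only [List.mem_cons]
          constructor
          · rintro ⟨⟨w, hw⟩, hnv⟩; exact ⟨⟨w, Or.inr hw⟩, hnv⟩
          · rintro ⟨⟨w, hw | hw⟩, hnv⟩
            · refine absurd (show c = (i, j) from ?_) hc
              have h' : c.1 = i ∧ c.2 = j ∧ w = num := by simpa using hw
              exact Prod.ext h'.1 h'.2.1
            · exact ⟨⟨w, hw⟩, hnv⟩
      · simp only [pvProc, hv, if_neg, not_false_iff]
        by_cases hc : c = (i, j)
        · subst hc; simp [hv, List.mem_cons]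
        · simp only [List.mem_cons, hc, false_or]
          rw [ih]
          simp only [PySem.Set.mem_add, hc, or_false]
          constructor
          · rintro ⟨⟨w, hw⟩, hnv⟩; exact ⟨⟨w, Or.inr hw⟩, hnv⟩
          · rintro ⟨⟨w, hw | hw⟩, hnv⟩
            · refine absurd (show c = (i, j) from ?_) hc
              have h' : c.1 = i ∧ c.2 = j ∧ w = num := by simpa using hw
              exact Prod.ext h'.1 h'.2.1
            · exact ⟨⟨w, hw⟩, hnv⟩

theorem pvProc_nodup : ∀ (Q : List (Int × Int × Int)) (vis : PySem.Set (Int × Int)),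
    (pvProc Q vis).Nodup := by
  intro Q
  induction Q with
  | nil => intro vis; simp [pvProc]
  | cons e Q ih =>
      obtain ⟨i, j, num⟩ := e
      intro vis
      by_cases hv : (i, j) ∈ vis
      · simp only [pvProc, hv, if_pos]; exact ih vis
      · simp only [pvProc, hv, if_neg, not_false_iff]
        refine List.Nodup.cons (fun hmem => ?_) (ih _)
        rw [pvProc_mem] at hmem
        exact hmem.2 ((PySem.Set.mem_add vis (i, j) (i, j)).2 (Or.inr rfl))

-- ---- the three components of a phase ----
theorem pvPhase_vis (nums : List (List Int)) (m n : Int) :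
    ∀ (Q : List (Int × Int × Int)) (dp : List (List Int)) (vis : PySem.Set (Int × Int))
      (c : Int × Int),
      c ∈ (pvPhase nums m n Q dp vis).2.2 ↔ c ∈ vis ∨ ∃ num, (c.1, c.2, num) ∈ Q := by
  intro Q
  induction Q with
  | nil => intro dp vis c; simp [pvPhase]
  | cons e Q ih =>
      obtain ⟨i, j, num⟩ := e
      intro dp vis c
      by_cases hv : (i, j) ∈ vis
      · simp only [pvPhase, hv, if_pos]
        rw [ih]
        constructor
        · rintro (h | ⟨w, hw⟩)
          · exact Or.inl h
          · exact Or.inr ⟨w, List.mem_cons_of_mem _ hw⟩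
        · rintro (h | ⟨w, hw⟩)
          · exact Or.inl h
          · rcases List.mem_cons.1 hw with hw | hw
            · have : c = (i, j) := by
                rw [Prod.mk.injEq, Prod.mk.injEq] at hw
                rw [Prod.ext_iff]; exact ⟨hw.1, hw.2.1⟩
              subst this; exact Or.inl hv
            · exact Or.inr ⟨w, hw⟩
      · simp only [pvPhase, hv, if_neg, not_false_iff]
        rw [ih]
        simp only [PySem.Set.mem_add]
        constructor
        · rintro ((h | h) | ⟨w, hw⟩)
          · exact Or.inl h
          · subst h; exact Or.inr ⟨num, List.mem_cons_self⟩
          · exact Or.inr ⟨w, List.mem_cons_of_mem _ hw⟩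
        · rintro (h | ⟨w, hw⟩)
          · exact Or.inl (Or.inl h)
          · rcases List.mem_cons.1 hw with hw | hw
            · refine Or.inl (Or.inr ?_)
              rw [Prod.mk.injEq, Prod.mk.injEq] at hw
              rw [Prod.ext_iff]; exact ⟨hw.1, hw.2.1⟩
            · exact Or.inr ⟨w, hw⟩

theorem pvPhase_news_len (nums : List (List Int)) (m n : Int) :
    ∀ (Q : List (Int × Int × Int)) (dp : List (List Int)) (vis : PySem.Set (Int × Int)),
      (pvPhase nums m n Q dp vis).1.length ≤ 4 * Q.length := by
  intro Q
  induction Q with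
  | nil => intro dp vis; simp [pvPhase]
  | cons e Q ih =>
      obtain ⟨i, j, num⟩ := e
      intro dp vis
      by_cases hv : (i, j) ∈ vis
      · simp only [pvPhase, hv, if_pos, List.length_cons]
        exact (ih dp vis).trans (by omega)
      · simp only [pvPhase, hv, if_neg, not_false_iff, List.length_append, List.length_cons]
        have h1 := pvStep_news_len nums m n i j num pvDirs [] dp
        have hd4 : pvDirs.length = 4 := rfl
        rw [hd4] at h1
        simp only [List.length_nil] at h1
        have h2 := ih (pvDirs.foldl (pvStep nums m n i j num) ([], dp)).2
          (PySem.Set.add vis (i, j))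
        omega

theorem pvPhase_news_mem (nums : List (List Int)) (m n v : Int) :
    ∀ (Q : List (Int × Int × Int)) (dp : List (List Int)) (vis : PySem.Set (Int × Int)),
      (∀ e ∈ Q, e.2.2 = v) →
      ∀ e, e ∈ (pvPhase nums m n Q dp vis).1 ↔
        ∃ b ∈ pvProc Q vis, ∃ d ∈ pvDirs,
          (0 ≤ b.1 + d.1 ∧ b.1 + d.1 < m ∧ 0 ≤ b.2 + d.2 ∧ b.2 + d.2 < n ∧
            pvGv nums (b.1 + d.1) (b.2 + d.2) = v - 1) ∧
          e = (b.1 + d.1, b.2 + d.2, v - 1) := by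
  intro Q
  induction Q with
  | nil => intro dp vis _ e; simp [pvPhase, pvProc]
  | cons en Q ih =>
      obtain ⟨i, j, num⟩ := en
      intro dp vis hQ e
      have hnum : num = v := hQ (i, j, num) List.mem_cons_self
      subst hnum
      have hQ' : ∀ e ∈ Q, e.2.2 = num := fun e he => hQ e (List.mem_cons_of_mem _ he)
      by_cases hv : (i, j) ∈ vis
      · simp only [pvPhase, pvProc, hv, if_pos]
        exact ih dp vis hQ' e
      · simp only [pvPhase, pvProc, hv, if_neg, not_false_iff]
        simp only [List.mem_append]
        rw [pvStep_news_iff nums m n i j num pvDirs [] dp e,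
            ih _ (PySem.Set.add vis (i, j)) hQ' e]
        simp only [List.not_mem_nil, false_or]
        constructor
        · rintro (⟨d, hd, hg, he⟩ | ⟨b, hb, d, hd, hg, he⟩)
          · exact ⟨(i, j), List.mem_cons_self, d, hd, hg, he⟩
          · exact ⟨b, List.mem_cons_of_mem _ hb, d, hd, hg, he⟩
        · rintro ⟨b, hb, d, hd, hg, he⟩
          rcases List.mem_cons.1 hb with hb | hb
          · subst hb; exact Or.inl ⟨d, hd, hg, he⟩
          · exact Or.inr ⟨b, hb, d, hd, hg, he⟩

theorem pvPhase_dp (nums : List (List Int)) (m n v : Int) :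
    ∀ (Q : List (Int × Int × Int)) (dp : List (List Int)) (vis : PySem.Set (Int × Int)),
      (∀ e ∈ Q, e.2.2 = v ∧ pvInBP m n e.1 e.2.1 ∧ pvGv nums e.1 e.2.1 = v) →
      pvRect m n dp →
      pvRect m n (pvPhase nums m n Q dp vis).2.1 ∧
      ∀ r c, pvInBP m n r c →
        pvGet2 (pvPhase nums m n Q dp vis).2.1 r c
          = pvGet2 dp r c + ((pvProc Q vis).map (fun b =>
              if pvAdjE b (r, c) ∧ pvGv nums r c = v - 1
              then pvGet2 dp b.1 b.2 else 0)).sum := by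
  intro Q
  induction Q with
  | nil => intro dp vis _ hrect; exact ⟨hrect, fun r c _ => by simp [pvPhase, pvProc]⟩
  | cons en Q ih =>
      obtain ⟨i, j, num⟩ := en
      intro dp vis hQ hrect
      obtain ⟨hnum, hijB, hijV⟩ := hQ (i, j, num) List.mem_cons_self
      simp only at hnum hijB hijV
      subst hnum
      have hQ' : ∀ e ∈ Q, e.2.2 = num ∧ pvInBP m n e.1 e.2.1 ∧ pvGv nums e.1 e.2.1 = num :=
        fun e he => hQ e (List.mem_cons_of_mem _ he)
      by_cases hv : (i, j) ∈ vis
      · simp only [pvPhase, pvProc, hv, if_pos]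
        exact ih dp vis hQ' hrect
      · simp only [pvPhase, pvProc, hv, if_neg, not_false_iff]
        obtain ⟨hrect1, hpt1⟩ :=
          pvStep_dp nums m n i j num hijB hijV pvDirs [] dp hrect
        set dp1 := (pvDirs.foldl (pvStep nums m n i j num) ([], dp)).2 with hdp1
        obtain ⟨hrect2, hpt2⟩ := ih dp1 (PySem.Set.add vis (i, j)) hQ' hrect1
        refine ⟨hrect2, fun r c hrc => ?_⟩
        rw [hpt2 r c hrc]
        have hhead : pvGet2 dp1 r c = pvGet2 dp r c +
            (if pvAdjE (i, j) (r, c) ∧ pvGv nums r c = num - 1 then pvGet2 dp i j else 0) := by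
          rw [hpt1 r c hrc, pvSum4]
        have hbase : ∀ b ∈ pvProc Q (PySem.Set.add vis (i, j)),
            pvGet2 dp1 b.1 b.2 = pvGet2 dp b.1 b.2 := by
          intro b hb
          rw [pvProc_mem] at hb
          obtain ⟨⟨w, hw⟩, _⟩ := hb
          obtain ⟨_, hbB, hbV⟩ := hQ' (b.1, b.2, w) hw
          simp only at hbB hbV
          rw [hpt1 b.1 b.2 hbB, pvSum4]
          rw [if_neg]
          · ring
          · rintro ⟨_, hvv⟩
            simp only [hbV] at hvv
            omega
        have hsum : ((pvProc Q (PySem.Set.add vis (i, j))).map (fun b =>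
              if pvAdjE b (r, c) ∧ pvGv nums r c = num - 1
              then pvGet2 dp1 b.1 b.2 else 0)).sum
            = ((pvProc Q (PySem.Set.add vis (i, j))).map (fun b =>
              if pvAdjE b (r, c) ∧ pvGv nums r c = num - 1
              then pvGet2 dp b.1 b.2 else 0)).sum := by
          congr 1
          refine List.map_congr_left (fun b hb => ?_)
          rw [hbase b hb]
        rw [hsum, hhead]
        simp only [List.map_cons, List.sum_cons]
        ring
-- ---- support-restricted sums ----
theorem pvSupp_sum (l P : List (Int × Int)) (f : (Int × Int) → Int)
    (hl : l.Nodup) (hP : P.Nodup) (hsupp : ∀ b, f b ≠ 0 → b ∈ P) :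
    (l.map f).sum = (P.map (fun p => if p ∈ l then f p else 0)).sum := by
  rw [← List.sum_toFinset f hl, ← List.sum_toFinset _ hP]
  have h1 : ∑ x ∈ l.toFinset, f x = ∑ x ∈ l.toFinset ∩ P.toFinset, f x := by
    refine (Finset.sum_subset Finset.inter_subset_left (fun x hx hnx => ?_)).symm
    by_contra hf
    exact hnx (Finset.mem_inter.2 ⟨hx, List.mem_toFinset.2 (hsupp x hf)⟩)
  have h2 : ∑ p ∈ P.toFinset, (if p ∈ l then f p else 0)
      = ∑ p ∈ P.toFinset ∩ l.toFinset, f p := by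
    rw [← Finset.sum_ite_mem]
    refine Finset.sum_congr rfl (fun p _ => ?_)
    simp [List.mem_toFinset]
  rw [h1, h2, Finset.inter_comm]

-- ---- the phase-to-phase invariant ----
def pvGeo : Nat → Nat
  | 0 => 0
  | r + 1 => 1 + 4 * pvGeo r

def pvInv (nums : List (List Int)) (m n : Int) (k : Nat) (Q : List (Int × Int × Int))
    (dp : List (List Int)) (vis : PySem.Set (Int × Int)) : Prop :=
  (∀ e ∈ Q, e.2.2 = 9 - (k : Int) ∧ pvInBP m n e.1 e.2.1 ∧
      pvGv nums e.1 e.2.1 = 9 - (k : Int)) ∧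
  pvRect m n dp ∧
  (∀ i j, pvInBP m n i j → 9 - (k : Int) ≤ pvGv nums i j →
      pvGet2 dp i j = pvWays nums m n k i j) ∧
  (∀ i j, pvInBP m n i j → pvGv nums i j < 9 - (k : Int) → pvGet2 dp i j = 0) ∧
  (∀ i j, pvInBP m n i j → pvGv nums i j = 9 - (k : Int) →
      (∀ num, (i, j, num) ∉ Q) → pvWays nums m n k i j = 0) ∧
  (∀ c ∈ vis, pvInBP m n c.1 c.2 ∧ 9 - (k : Int) < pvGv nums c.1 c.2)

theorem pvInv_step (nums : List (List Int)) (m n : Int) (k : Nat) (hk : k ≤ 8)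
    (Q : List (Int × Int × Int)) (dp : List (List Int)) (vis : PySem.Set (Int × Int))
    (hinv : pvInv nums m n k Q dp vis) :
    pvInv nums m n (k + 1) (pvPhase nums m n Q dp vis).1 (pvPhase nums m n Q dp vis).2.1
      (pvPhase nums m n Q dp vis).2.2 := by
  obtain ⟨ha, hb, hc, hd, he, hf⟩ := hinv
  have hcast : ((k + 1 : Nat) : Int) = (k : Int) + 1 := by push_cast; ring
  set v : Int := 9 - (k : Int) with hv
  have hv1 : (9 : Int) - ((k + 1 : Nat) : Int) = v - 1 := by rw [hcast, hv]; ring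
  have hQv : ∀ e ∈ Q, e.2.2 = v := fun e he' => (ha e he').1
  obtain ⟨hrect', hdp'⟩ := pvPhase_dp nums m n v Q dp vis ha hb
  have hprocQ : ∀ b : Int × Int, b ∈ pvProc Q vis ↔ ∃ num, (b.1, b.2, num) ∈ Q := by
    intro b
    rw [pvProc_mem]
    constructor
    · rintro ⟨h1, _⟩; exact h1
    · rintro ⟨w, hw⟩
      refine ⟨⟨w, hw⟩, fun hbv => ?_⟩
      have h1 := (hf b hbv).2
      have h2 := (ha (b.1, b.2, w) hw).2.2
      simp only at h2
      omega
  have hprocB : ∀ b : Int × Int, b ∈ pvProc Q vis →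
      pvInBP m n b.1 b.2 ∧ pvGv nums b.1 b.2 = v := by
    intro b hbp
    obtain ⟨w, hw⟩ := (hprocQ b).1 hbp
    exact ⟨(ha (b.1, b.2, w) hw).2.1, (ha (b.1, b.2, w) hw).2.2⟩
  refine ⟨?_, hrect', ?_, ?_, ?_, ?_⟩
  · -- (a) the new queue entries sit at level 9-(k+1)
    intro e hme
    rw [pvPhase_news_mem nums m n v Q dp vis hQv e] at hme
    obtain ⟨b, hbp, d, hd', hg, rfl⟩ := hme
    refine ⟨by simp only; omega, ⟨hg.1, hg.2.1, hg.2.2.1, hg.2.2.2.1⟩, ?_⟩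
    simp only
    rw [hv1]
    exact hg.2.2.2.2
  · -- (c) cells at level ≥ 9-(k+1) now carry pvWays (k+1)
    intro i j hij hge
    rw [hdp' i j hij]
    rw [hv1] at hge
    by_cases hval8 : pvGv nums i j = v - 1
    · -- frontier cell: freshly filled in this phase
      have hdp0 : pvGet2 dp i j = 0 := hd i j hij (by omega)
      have hcong : ∀ b ∈ pvProc Q vis,
          (if pvAdjE b (i, j) ∧ pvGv nums i j = v - 1 then pvGet2 dp b.1 b.2 else 0)
            = (if pvAdjE b (i, j) then pvGet2 dp b.1 b.2 else 0) := by
        intro b _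
        by_cases hA : pvAdjE b (i, j) <;> simp [hA, hval8]
      rw [List.map_congr_left hcong, hdp0]
      have hnbrs_nodup : (pvDirs.map (fun d => (i + d.1, j + d.2))).Nodup := by
        simp [pvDirs, Prod.ext_iff] <;> omega
      have hmem_nbrs : ∀ b : Int × Int,
          b ∈ pvDirs.map (fun d => (i + d.1, j + d.2)) ↔ pvAdjE b (i, j) := by
        intro b
        simp [pvDirs, Prod.ext_iff, pvAdjE]
        omega
      rw [pvSupp_sum (pvProc Q vis) (pvDirs.map (fun d => (i + d.1, j + d.2)))
            (fun b => if pvAdjE b (i, j) then pvGet2 dp b.1 b.2 else 0)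
            (pvProc_nodup Q vis) hnbrs_nodup
            (fun b hfb => (hmem_nbrs b).2 (by by_contra hA; exact hfb (if_neg hA)))]
      rw [List.map_map]
      have hways : pvWays nums m n (k + 1) i j
          = (pvDirs.map (fun d =>
              if 0 ≤ i + d.1 ∧ i + d.1 < m ∧ 0 ≤ j + d.2 ∧ j + d.2 < n ∧
                  pvGv nums (i + d.1) (j + d.2) = 9 - (k : Int)
              then pvWays nums m n k (i + d.1) (j + d.2) else 0)).sum := by
        conv_lhs => rw [pvWays]
        rw [if_pos (show pvGv nums i j = 8 - (k : Int) by omega)]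
      rw [hways]
      rw [zero_add]
      refine congrArg List.sum (List.map_congr_left (fun d hd' => ?_))
      simp only [Function.comp]
      have hAdj : pvAdjE (i + d.1, j + d.2) (i, j) := by
        simp only [pvDirs, List.mem_cons, List.not_mem_nil, or_false] at hd'
        rcases hd' with rfl | rfl | rfl | rfl <;> simp [pvAdjE] <;> omega
      by_cases hp : (i + d.1, j + d.2) ∈ pvProc Q vis
      · rw [if_pos hp, if_pos hAdj]
        obtain ⟨hbB, hbV⟩ := hprocB _ hp
        simp only at hbB hbV
        rw [if_pos ⟨hbB.1, hbB.2.1, hbB.2.2.1, hbB.2.2.2, by omega⟩]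
        exact hc _ _ hbB (by rw [hbV])
      · rw [if_neg hp]
        by_cases hg : 0 ≤ i + d.1 ∧ i + d.1 < m ∧ 0 ≤ j + d.2 ∧ j + d.2 < n ∧
            pvGv nums (i + d.1) (j + d.2) = 9 - (k : Int)
        · rw [if_pos hg]
          refine (he (i + d.1) (j + d.2) ⟨hg.1, hg.2.1, hg.2.2.1, hg.2.2.2.1⟩
            (by omega) (fun w hw => ?_)).symm
          exact hp ((hprocQ (i + d.1, j + d.2)).2 ⟨w, hw⟩)
        · rw [if_neg hg]
    · -- cell already final before this phase
      have hge' : v ≤ pvGv nums i j := by omega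
      have hzero : ((pvProc Q vis).map (fun b =>
          if pvAdjE b (i, j) ∧ pvGv nums i j = v - 1 then pvGet2 dp b.1 b.2 else 0)).sum
            = 0 := by
        refine List.sum_eq_zero (fun x hx => ?_)
        obtain ⟨b, _, rfl⟩ := List.mem_map.1 hx
        exact if_neg (fun hcc => hval8 hcc.2)
      rw [hzero, add_zero, hc i j hij hge']
      have : pvWays nums m n (k + 1) i j = pvWays nums m n k i j := by
        conv_lhs => rw [pvWays]
        rw [if_neg (show ¬ pvGv nums i j = 8 - (k : Int) by omega)]
      rw [this]
  · -- (d) cells below the new frontier are still 0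
    intro i j hij hlt
    rw [hdp' i j hij]
    rw [hv1] at hlt
    have hzero : ((pvProc Q vis).map (fun b =>
        if pvAdjE b (i, j) ∧ pvGv nums i j = v - 1 then pvGet2 dp b.1 b.2 else 0)).sum
          = 0 := by
      refine List.sum_eq_zero (fun x hx => ?_)
      obtain ⟨b, _, rfl⟩ := List.mem_map.1 hx
      exact if_neg (fun hcc => by omega)
    rw [hzero, add_zero]
    exact hd i j hij (by omega)
  · -- (e) unenqueued cells at the new frontier have no trails
    intro i j hij hval hnotin
    rw [hv1] at hval
    rw [pvWays]
    rw [if_pos (show pvGv nums i j = 8 - (k : Int) by omega)]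
    refine List.sum_eq_zero (fun x hx => ?_)
    obtain ⟨d, hd', rfl⟩ := List.mem_map.1 hx
    by_cases hg : 0 ≤ i + d.1 ∧ i + d.1 < m ∧ 0 ≤ j + d.2 ∧ j + d.2 < n ∧
        pvGv nums (i + d.1) (j + d.2) = 9 - (k : Int)
    · rw [if_pos hg]
      by_cases hp : (i + d.1, j + d.2) ∈ pvProc Q vis
      · -- then (i,j) would have been enqueued
        exfalso
        refine hnotin (v - 1) ?_
        rw [pvPhase_news_mem nums m n v Q dp vis hQv]
        obtain ⟨hi0, him, hj0, hjn⟩ := hij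
        simp only [pvDirs, List.mem_cons, List.not_mem_nil, or_false] at hd'
        rcases hd' with rfl | rfl | rfl | rfl
        · exact ⟨(i, j + 1), by simpa using hp, (0, -1), by simp [pvDirs],
            ⟨by simp; omega, by simp; omega, by simp; omega, by simp; omega,
              by simpa using hval⟩, by simp⟩
        · exact ⟨(i + 1, j), by simpa using hp, (-1, 0), by simp [pvDirs],
            ⟨by simp; omega, by simp; omega, by simp; omega, by simp; omega,
              by simpa using hval⟩, by simp⟩
        · exact ⟨(i, j - 1), by simpa using hp, (0, 1), by simp [pvDirs],
            ⟨by simp; omega, by simp; omega, by simp; omega, by simp; omega,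
              by simpa using hval⟩, by simp⟩
        · exact ⟨(i - 1, j), by simpa using hp, (1, 0), by simp [pvDirs],
            ⟨by simp; omega, by simp; omega, by simp; omega, by simp; omega,
              by simpa using hval⟩, by simp⟩
      · refine he (i + d.1) (j + d.2) ⟨hg.1, hg.2.1, hg.2.2.1, hg.2.2.2.1⟩
          (by omega) (fun w hw => ?_)
        exact hp ((hprocQ (i + d.1, j + d.2)).2 ⟨w, hw⟩)
    · rw [if_neg hg]
  · -- (f) everything visited now sits strictly above the new frontier
    intro c hcv
    rw [pvPhase_vis] at hcv
    rcases hcv with hcv | ⟨w, hw⟩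
    · obtain ⟨h1, h2⟩ := hf c hcv
      exact ⟨h1, by omega⟩
    · obtain ⟨h1, h2, h3⟩ := ha (c.1, c.2, w) hw
      simp only at h2 h3
      exact ⟨h2, by rw [h3]; omega⟩
theorem pvChain (nums : List (List Int)) (m n : Int) :
    ∀ (r k : Nat), k + r = 9 →
    ∀ (Q : List (Int × Int × Int)) (dp : List (List Int)) (vis : PySem.Set (Int × Int))
      (fuel : Nat),
      pvInv nums m n k Q dp vis → pvGeo r * Q.length ≤ fuel →
      ∀ i j, pvInBP m n i j → 0 ≤ pvGv nums i j →
        pvGet2 (pvBfs nums m n fuel Q dp vis) i j = pvWays nums m n 9 i j := by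
  intro r
  induction r with
  | zero =>
      intro k hk Q dp vis fuel hinv _ i j hij hval
      have hk9 : k = 9 := by omega
      subst hk9
      obtain ⟨ha, hb, hc, hd, he, hf⟩ := hinv
      rw [pvBfs_high nums m n 0 fuel Q dp vis
          (fun e he' => by have h := (ha e he').1; omega) i j hij hval]
      exact hc i j hij (by push_cast; omega)
  | succ r ih =>
      intro k hk Q dp vis fuel hinv hfuel i j hij hval
      have hk8 : k ≤ 8 := by omega
      have hpos : 0 < pvGeo (r + 1) := by simp [pvGeo]
      have hQfuel : Q.length ≤ fuel :=
        le_trans (Nat.le_mul_of_pos_left _ hpos) hfuel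
      obtain ⟨fuel', rfl⟩ : ∃ f', fuel = f' + Q.length :=
        ⟨fuel - Q.length, by omega⟩
      have hph := pvBfs_phase nums m n Q [] dp vis fuel'
      rw [List.append_nil] at hph
      simp only [List.nil_append] at hph
      rw [hph]
      have hstep := pvInv_step nums m n k hk8 Q dp vis hinv
      refine ih (k + 1) (by omega) _ _ _ fuel' hstep ?_ i j hij hval
      have hlen := pvPhase_news_len nums m n Q dp vis
      have hexp : pvGeo (r + 1) * Q.length
          = Q.length + 4 * (pvGeo r * Q.length) := by
        simp [pvGeo]; ring
      have hmul : pvGeo r * (pvPhase nums m n Q dp vis).1.length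
          ≤ pvGeo r * (4 * Q.length) := Nat.mul_le_mul_left _ hlen
      have hmul2 : pvGeo r * (4 * Q.length) = 4 * (pvGeo r * Q.length) := by ring
      rw [hmul2] at hmul
      rw [hexp] at hfuel
      omega

-- ---- the seeding loops of A ----
theorem pvSeed_inner (nums : List (List Int)) (m n : Int) (i : Int)
    (hi0 : 0 ≤ i) (him : i < m) :
    ∀ (js : List Int) (dp : List (List Int)), pvRect m n dp → (∀ j ∈ js, 0 ≤ j ∧ j < n) →
      pvRect m n (js.foldl (fun dp j => if pvGv nums i j = 9 then pvSet2 dp i j 1 else dp) dp) ∧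
      ∀ r c, 0 ≤ r → 0 ≤ c →
        pvGet2 (js.foldl (fun dp j => if pvGv nums i j = 9 then pvSet2 dp i j 1 else dp) dp) r c
          = if r = i ∧ c ∈ js ∧ pvGv nums i c = 9 then 1 else pvGet2 dp r c := by
  intro js
  induction js with
  | nil => intro dp hrect _; exact ⟨hrect, fun r c _ _ => by simp⟩
  | cons j js ihs =>
      intro dp hrect hjs
      obtain ⟨hj0, hjn⟩ := hjs j List.mem_cons_self
      have hjs' : ∀ x ∈ js, 0 ≤ x ∧ x < n := fun x hx => hjs x (List.mem_cons_of_mem _ hx)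
      by_cases hval : pvGv nums i j = 9
      · simp only [List.foldl_cons, hval, if_pos]
        set dp1 := pvSet2 dp i j 1 with hdp1
        have hrect1 : pvRect m n dp1 := pvRect_pvSet2 m n dp i j 1 hi0 hj0 hrect
        obtain ⟨hrect2, hpt⟩ := ihs dp1 hrect1 hjs'
        refine ⟨hrect2, fun r c hr0 hc0 => ?_⟩
        rw [hpt r c hr0 hc0]
        have hpt1 : pvGet2 dp1 r c = if r = i ∧ c = j then 1 else pvGet2 dp r c := by
          by_cases hrc : r = i ∧ c = j
          · obtain ⟨rfl, rfl⟩ := hrc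
            rw [if_pos ⟨rfl, rfl⟩, hdp1]
            exact pvGet2_pvSet2_eq dp r c 1 hr0 hc0
              (by rw [hrect.1]; omega)
              (by rw [hrect.2 _ (by
                    rw [List.getD_eq_getElem _ _ (by rw [hrect.1]; omega)]
                    exact List.getElem_mem _)]
                  omega)
          · rw [if_neg hrc, hdp1]
            exact pvGet2_pvSet2_ne dp i j r c 1 hi0 hj0 hr0 hc0 hrc
        rw [hpt1]
        by_cases hri : r = i
        · by_cases hcj : c = j
          · by_cases hin : j ∈ js <;> simp [hri, hcj, hval, hin]
          · by_cases hin : c ∈ js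
            · by_cases hv2 : pvGv nums i c = 9 <;>
                simp [hri, List.mem_cons, hcj, hin, hv2]
            · simp [hri, List.mem_cons, hcj, hin]
        · simp [hri]
      · simp only [List.foldl_cons, hval, if_neg, not_false_iff]
        obtain ⟨hrect2, hpt⟩ := ihs dp hrect hjs'
        refine ⟨hrect2, fun r c hr0 hc0 => ?_⟩
        rw [hpt r c hr0 hc0]
        by_cases hcj : c = j
        · subst hcj; simp [hval]
        · simp [List.mem_cons, hcj]

theorem pvSeed_outer (nums : List (List Int)) (m n : Int) :
    ∀ (is : List Int) (dp : List (List Int)), pvRect m n dp → (∀ i ∈ is, 0 ≤ i ∧ i < m) →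
      pvRect m n (is.foldl (fun dp i => (PySem.List.pyRange 0 n 1).foldl
        (fun dp j => if pvGv nums i j = 9 then pvSet2 dp i j 1 else dp) dp) dp) ∧
      ∀ r c, pvInBP m n r c →
        pvGet2 (is.foldl (fun dp i => (PySem.List.pyRange 0 n 1).foldl
          (fun dp j => if pvGv nums i j = 9 then pvSet2 dp i j 1 else dp) dp) dp) r c
          = if r ∈ is ∧ pvGv nums r c = 9 then 1 else pvGet2 dp r c := by
  intro is
  induction is with
  | nil => intro dp hrect _; exact ⟨hrect, fun r c _ => by simp⟩
  | cons i is ihs =>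
      intro dp hrect his
      obtain ⟨hi0, him⟩ := his i List.mem_cons_self
      have his' : ∀ x ∈ is, 0 ≤ x ∧ x < m := fun x hx => his x (List.mem_cons_of_mem _ hx)
      simp only [List.foldl_cons]
      obtain ⟨hrect1, hpt1⟩ := pvSeed_inner nums m n i hi0 him (PySem.List.pyRange 0 n 1) dp
        hrect (fun j hj => by rw [PySem.List.mem_pyRange_one] at hj; omega)
      obtain ⟨hrect2, hpt2⟩ := ihs _ hrect1 his'
      refine ⟨hrect2, fun r c hrc => ?_⟩
      obtain ⟨hr0, hrm, hc0, hcn⟩ := hrc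
      rw [hpt2 r c ⟨hr0, hrm, hc0, hcn⟩, hpt1 r c hr0 hc0]
      simp only [PySem.List.mem_pyRange_one, List.mem_cons]
      by_cases hri : r = i
      · subst hri
        by_cases hval : pvGv nums r c = 9
        · simp [hval, hc0, hcn]
        · simp [hval]
      · simp [hri]
-- ---- seed fold: split the (dp, q) state into its two independent folds ----
theorem pvSeed_split (nums : List (List Int)) (m n : Int) (dp0 : List (List Int)) :
    (PySem.List.pyRange 0 m 1).foldl (fun st i =>
        (PySem.List.pyRange 0 n 1).foldl (fun st j =>
          if pvGv nums i j = 9 then (pvSet2 st.1 i j 1, st.2 ++ [(i, j, (9 : Int))]) else st) st)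
      (dp0, ([] : List (Int × Int × Int)))
    = ((PySem.List.pyRange 0 m 1).foldl (fun dp i => (PySem.List.pyRange 0 n 1).foldl
          (fun dp j => if pvGv nums i j = 9 then pvSet2 dp i j 1 else dp) dp) dp0,
       (PySem.List.pyRange 0 m 1).foldl (fun q i => (PySem.List.pyRange 0 n 1).foldl
          (fun q j => if pvGv nums i j = 9 then q ++ [(i, j, (9 : Int))] else q) q) []) := by
  have houter : (fun (st : List (List Int) × List (Int × Int × Int)) (i : Int) =>
      (PySem.List.pyRange 0 n 1).foldl (fun st j =>
        if pvGv nums i j = 9 then (pvSet2 st.1 i j 1, st.2 ++ [(i, j, (9 : Int))]) else st) st)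
      = (fun st i =>
        ((PySem.List.pyRange 0 n 1).foldl
          (fun dp j => if pvGv nums i j = 9 then pvSet2 dp i j 1 else dp) st.1,
         (PySem.List.pyRange 0 n 1).foldl
          (fun q j => if pvGv nums i j = 9 then q ++ [(i, j, (9 : Int))] else q) st.2)) := by
    funext st i
    have hsplit : (fun (st : List (List Int) × List (Int × Int × Int)) (j : Int) =>
        if pvGv nums i j = 9 then (pvSet2 st.1 i j 1, st.2 ++ [(i, j, (9 : Int))]) else st)
        = (fun st j => (if pvGv nums i j = 9 then pvSet2 st.1 i j 1 else st.1,
                        if pvGv nums i j = 9 then st.2 ++ [(i, j, (9 : Int))] else st.2)) := by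
      funext st j
      split <;> rfl
    rw [hsplit]
    exact PySem.List.foldl_prod_mk
      (fun dp j => if pvGv nums i j = 9 then pvSet2 dp i j 1 else dp)
      (fun q j => if pvGv nums i j = 9 then q ++ [(i, j, (9 : Int))] else q)
      (PySem.List.pyRange 0 n 1) st.1 st.2
  rw [houter]
  exact PySem.List.foldl_prod_mk
    (fun dp i => (PySem.List.pyRange 0 n 1).foldl
      (fun dp j => if pvGv nums i j = 9 then pvSet2 dp i j 1 else dp) dp)
    (fun q i => (PySem.List.pyRange 0 n 1).foldl
      (fun q j => if pvGv nums i j = 9 then q ++ [(i, j, (9 : Int))] else q) q)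
    (PySem.List.pyRange 0 m 1) dp0 []

-- the seeded queue in closed form
theorem pvSeedQ_eq (nums : List (List Int)) (m n : Int) :
    (PySem.List.pyRange 0 m 1).foldl (fun q i => (PySem.List.pyRange 0 n 1).foldl
        (fun q j => if pvGv nums i j = 9 then q ++ [(i, j, (9 : Int))] else q) q) []
      = (PySem.List.pyRange 0 m 1).flatMap (fun i =>
          ((PySem.List.pyRange 0 n 1).filter (fun j => decide (pvGv nums i j = 9))).map
            (fun j => (i, j, (9 : Int)))) := by
  have hinner : (fun (q : List (Int × Int × Int)) (i : Int) =>
      (PySem.List.pyRange 0 n 1).foldl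
        (fun q j => if pvGv nums i j = 9 then q ++ [(i, j, (9 : Int))] else q) q)
      = (fun q i => q ++ ((PySem.List.pyRange 0 n 1).filter
          (fun j => decide (pvGv nums i j = 9))).map (fun j => (i, j, (9 : Int)))) := by
    funext q i
    exact PySem.List.foldl_append_ite (p := fun j : Int => pvGv nums i j = 9)
      (f := fun j => (i, j, (9 : Int))) (l := PySem.List.pyRange 0 n 1) (acc := q)
  rw [hinner, PySem.List.foldl_append_eq_flatMap]
  simp

theorem pvSeedQ_mem (nums : List (List Int)) (m n : Int) (e : Int × Int × Int) :
    e ∈ (PySem.List.pyRange 0 m 1).flatMap (fun i =>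
        ((PySem.List.pyRange 0 n 1).filter (fun j => decide (pvGv nums i j = 9))).map
          (fun j => (i, j, (9 : Int)))) ↔
      ∃ a b : Int, (0 ≤ a ∧ a < m) ∧ (0 ≤ b ∧ b < n) ∧ pvGv nums a b = 9 ∧
        e = (a, b, (9 : Int)) := by
  simp only [List.mem_flatMap, List.mem_map, List.mem_filter,
    PySem.List.mem_pyRange_one, decide_eq_true_eq]
  constructor
  · rintro ⟨a, ha, b, ⟨hb, hv⟩, rfl⟩
    exact ⟨a, b, ⟨by omega, by omega⟩, ⟨by omega, by omega⟩, hv, rfl⟩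
  · rintro ⟨a, b, ha, hb, hv, rfl⟩
    exact ⟨a, ⟨by omega, by omega⟩, b, ⟨⟨by omega, by omega⟩, hv⟩, rfl⟩

theorem pvSeedQ_len (nums : List (List Int)) (m n : Int) :
    ((PySem.List.pyRange 0 m 1).flatMap (fun i =>
        ((PySem.List.pyRange 0 n 1).filter (fun j => decide (pvGv nums i j = 9))).map
          (fun j => (i, j, (9 : Int))))).length ≤ m.toNat * n.toNat := by
  rw [List.length_flatMap]
  have hbound : ∀ i ∈ PySem.List.pyRange 0 m 1,
      (((PySem.List.pyRange 0 n 1).filter (fun j => decide (pvGv nums i j = 9))).map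
        (fun j => (i, j, (9 : Int)))).length ≤ n.toNat := by
    intro i _
    rw [List.length_map]
    refine (List.length_filter_le _ _).trans ?_
    rw [PySem.List.length_pyRange_one]
    omega
  calc ((PySem.List.pyRange 0 m 1).map _).sum
      ≤ ((PySem.List.pyRange 0 m 1).map (fun _ => n.toNat)).sum :=
        List.sum_le_sum hbound
    _ = (PySem.List.pyRange 0 m 1).length * n.toNat := by
        simp [List.map_const', List.sum_replicate, smul_eq_mul]
    _ ≤ m.toNat * n.toNat := by
        rw [PySem.List.length_pyRange_one]
        have : (m - 0).toNat ≤ m.toNat := by omega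
        exact Nat.mul_le_mul_right _ this
-- ---- the initial invariant and the A-side closed form ----
def pvCanon (nums : List (List Int)) (m n : Int) : Int :=
  ((PySem.List.pyRange 0 m 1).map (fun i =>
    ((PySem.List.pyRange 0 n 1).map (fun j =>
      if pvGv nums i j = 0 then pvWays nums m n 9 i j else 0)).sum)).sum

theorem pvInv_zero (nums : List (List Int)) (m n : Int) :
    pvInv nums m n 0
      ((PySem.List.pyRange 0 m 1).flatMap (fun i =>
        ((PySem.List.pyRange 0 n 1).filter (fun j => decide (pvGv nums i j = 9))).map
          (fun j => (i, j, (9 : Int)))))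
      ((PySem.List.pyRange 0 m 1).foldl (fun dp i => (PySem.List.pyRange 0 n 1).foldl
          (fun dp j => if pvGv nums i j = 9 then pvSet2 dp i j 1 else dp) dp)
        ((PySem.List.pyRange 0 m 1).map (fun _ =>
          (PySem.List.pyRange 0 n 1).map (fun _ => (0 : Int)))))
      PySem.Set.empty := by
  have hrect0 : pvRect m n ((PySem.List.pyRange 0 m 1).map (fun _ =>
      (PySem.List.pyRange 0 n 1).map (fun _ => (0 : Int)))) := by
    constructor
    · rw [List.length_map, PySem.List.length_pyRange_one]
      omega
    · intro r hr
      obtain ⟨i, _, rfl⟩ := List.mem_map.1 hr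
      rw [List.length_map, PySem.List.length_pyRange_one]
      omega
  have hget0 : ∀ r c, pvInBP m n r c →
      pvGet2 ((PySem.List.pyRange 0 m 1).map (fun _ =>
        (PySem.List.pyRange 0 n 1).map (fun _ => (0 : Int)))) r c = 0 := by
    intro r c ⟨h1, h2, h3, h4⟩
    exact pvGet2_grid m n (fun _ _ => 0) r c h1 h2 h3 h4
  obtain ⟨hrectS, hptS⟩ := pvSeed_outer nums m n (PySem.List.pyRange 0 m 1) _ hrect0
    (fun i hi => by rw [PySem.List.mem_pyRange_one] at hi; omega)
  refine ⟨?_, hrectS, ?_, ?_, ?_, ?_⟩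
  · intro e he
    rw [pvSeedQ_mem nums m n e] at he
    obtain ⟨a, b, ha, hb, hv, rfl⟩ := he
    exact ⟨by simp, ⟨by simp; omega, by simp; omega, by simp; omega, by simp; omega⟩,
      by simp; omega⟩
  · intro i j hij _
    rw [hptS i j hij]
    obtain ⟨h1, h2, h3, h4⟩ := hij
    have hmem : i ∈ PySem.List.pyRange 0 m 1 := PySem.List.mem_pyRange_one.2 ⟨h1, h2⟩
    have hw0 : pvWays nums m n 0 i j = if pvGv nums i j = 9 then 1 else 0 := rfl
    rw [hw0]
    by_cases hv9 : pvGv nums i j = 9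
    · rw [if_pos ⟨hmem, hv9⟩, if_pos hv9]
    · rw [if_neg (fun hh => hv9 hh.2), if_neg hv9]
      exact hget0 i j ⟨h1, h2, h3, h4⟩
  · intro i j hij hlt
    rw [hptS i j hij]
    have hne : ¬ pvGv nums i j = 9 := by push_cast at hlt; omega
    rw [if_neg (fun hh => hne hh.2)]
    exact hget0 i j hij
  · intro i j hij hval hnot
    exfalso
    obtain ⟨h1, h2, h3, h4⟩ := hij
    refine hnot 9 ?_
    rw [pvSeedQ_mem nums m n]
    exact ⟨i, j, ⟨h1, h2⟩, ⟨h3, h4⟩, by push_cast at hval; omega, rfl⟩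
  · intro c hc
    simp [PySem.Set.empty] at hc

-- nested count-the-zero-cells loop turned into a double sum
theorem pvFold_sum (nums : List (List Int)) (m n : Int) (dpF : List (List Int)) :
    (PySem.List.pyRange 0 m 1).foldl (fun res i =>
      (PySem.List.pyRange 0 n 1).foldl (fun res j =>
        if pvGv nums i j = 0 then res + pvGet2 dpF i j else res) res) 0
    = ((PySem.List.pyRange 0 m 1).map (fun i =>
        ((PySem.List.pyRange 0 n 1).map (fun j =>
          if pvGv nums i j = 0 then pvGet2 dpF i j else 0)).sum)).sum := by
  have h1 : ∀ i : Int, (fun (res : Int) (j : Int) =>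
      if pvGv nums i j = 0 then res + pvGet2 dpF i j else res)
      = (fun res j => res + (if pvGv nums i j = 0 then pvGet2 dpF i j else 0)) := by
    intro i
    funext res j
    split <;> simp
  have h2 : (fun (res : Int) (i : Int) => (PySem.List.pyRange 0 n 1).foldl
      (fun res j => if pvGv nums i j = 0 then res + pvGet2 dpF i j else res) res)
      = (fun res i => res + ((PySem.List.pyRange 0 n 1).map (fun j =>
          if pvGv nums i j = 0 then pvGet2 dpF i j else 0)).sum) := by
    funext res i
    rw [h1 i]
    exact PySem.List.foldl_add _ _ _
  rw [h2, PySem.List.foldl_add]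
  simp

theorem pvA_sum (nums : List (List Int)) :
    sum_up2 nums = pvCanon nums (PySem.List.len nums)
      (PySem.List.len (PySem.List.pyGetD nums 0 [])) := by
  simp only [sum_up2]
  set m := PySem.List.len nums with hm
  set n := PySem.List.len (PySem.List.pyGetD nums 0 []) with hn
  have hm0 : 0 ≤ m := by rw [hm, PySem.List.len_eq]; positivity
  have hn0 : 0 ≤ n := by rw [hn, PySem.List.len_eq]; positivity
  rw [pvSeed_split nums m n]
  simp only
  rw [pvSeedQ_eq nums m n]
  rw [pvFold_sum nums m n]
  have hmn : (m * n).toNat = m.toNat * n.toNat := by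
    rw [hm, hn, PySem.List.len_eq, PySem.List.len_eq]
    push_cast
    rw [← Nat.cast_mul, Int.toNat_natCast]
    simp
  have hfuel : pvGeo 9 * ((PySem.List.pyRange 0 m 1).flatMap (fun i =>
      ((PySem.List.pyRange 0 n 1).filter (fun j => decide (pvGv nums i j = 9))).map
        (fun j => (i, j, (9 : Int))))).length ≤ (m * n).toNat * 4 ^ 10 + 1 := by
    have hq := pvSeedQ_len nums m n
    have hgeo : pvGeo 9 = 87381 := by norm_num [pvGeo]
    have h410 : (4 : Nat) ^ 10 = 1048576 := by norm_num
    rw [hgeo, hmn, h410]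
    have := Nat.mul_le_mul_left 87381 hq
    omega
  have hchain := pvChain nums m n 9 0 (by norm_num) _ _ PySem.Set.empty
    ((m * n).toNat * 4 ^ 10 + 1) (pvInv_zero nums m n) hfuel
  unfold pvCanon
  refine congrArg List.sum (List.map_congr_left fun i hi =>
    congrArg List.sum (List.map_congr_left fun j hj => ?_))
  rw [PySem.List.mem_pyRange_one] at hi hj
  by_cases hv0 : pvGv nums i j = 0
  · rw [if_pos hv0, if_pos hv0]
    exact hchain i j ⟨by omega, by omega, by omega, by omega⟩ (by omega)
  · rw [if_neg hv0, if_neg hv0]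
-- ---- B side: one DP round advances the grid one level ----
theorem pvSum_filter_map {α : Type} (l : List α) (p : α → Bool) (f : α → Int) :
    ((l.filter p).map f).sum = (l.map (fun x => if p x then f x else 0)).sum := by
  induction l with
  | nil => simp
  | cons x l ih => cases hp : p x <;> simp [hp, ih]

theorem pvStepB_grid (nums : List (List Int)) (m n : Int) (k : Nat) :
    pvStepB nums m n ((PySem.List.pyRange 0 m 1).map (fun i =>
        (PySem.List.pyRange 0 n 1).map (fun j => pvWays nums m n k i j))) (8 - (k : Int))
      = (PySem.List.pyRange 0 m 1).map (fun i =>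
          (PySem.List.pyRange 0 n 1).map (fun j => pvWays nums m n (k + 1) i j)) := by
  unfold pvStepB
  refine List.map_congr_left fun i hi => List.map_congr_left fun j hj => ?_
  rw [PySem.List.mem_pyRange_one] at hi hj
  have harith : (8 : Int) - (k : Int) + 1 = 9 - (k : Int) := by ring
  conv_rhs => rw [pvWays]
  by_cases hval : pvGv nums i j = 8 - (k : Int)
  · rw [if_pos hval, if_pos hval]
    rw [pvSum_filter_map]
    refine congrArg List.sum (List.map_congr_left fun d hd => ?_)
    simp only [harith, decide_eq_true_eq]
    by_cases hg : 0 ≤ i + d.1 ∧ i + d.1 < m ∧ 0 ≤ j + d.2 ∧ j + d.2 < n ∧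
        pvGv nums (i + d.1) (j + d.2) = 9 - (k : Int)
    · rw [if_pos hg, if_pos hg]
      exact pvGet2_grid m n (fun a b => pvWays nums m n k a b) _ _
        hg.1 hg.2.1 hg.2.2.1 hg.2.2.2.1
    · rw [if_neg hg, if_neg hg]
  · rw [if_neg hval, if_neg hval]
    exact pvGet2_grid m n (fun a b => pvWays nums m n k a b) i j
      (by omega) (by omega) (by omega) (by omega)

theorem pvRange_desc : PySem.List.pyRange 8 (-1) (-1) = [8, 7, 6, 5, 4, 3, 2, 1, 0] := by
  decide

theorem pvB_sum (nums : List (List Int)) :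
    sum_up2_alt nums = pvCanon nums (PySem.List.len nums)
      (PySem.List.len (PySem.List.pyGetD nums 0 [])) := by
  simp only [sum_up2_alt]
  set m := PySem.List.len nums with hm
  set n := PySem.List.len (PySem.List.pyGetD nums 0 []) with hn
  rw [pvRange_desc]
  simp only [List.foldl_cons, List.foldl_nil]
  have hG0 : (PySem.List.pyRange 0 m 1).map (fun i =>
      (PySem.List.pyRange 0 n 1).map (fun j => if pvGv nums i j = 9 then (1 : Int) else 0))
      = (PySem.List.pyRange 0 m 1).map (fun i =>
          (PySem.List.pyRange 0 n 1).map (fun j => pvWays nums m n 0 i j)) := rfl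
  rw [hG0]
  have h0 := pvStepB_grid nums m n 0
  have h1 := pvStepB_grid nums m n 1
  have h2 := pvStepB_grid nums m n 2
  have h3 := pvStepB_grid nums m n 3
  have h4 := pvStepB_grid nums m n 4
  have h5 := pvStepB_grid nums m n 5
  have h6 := pvStepB_grid nums m n 6
  have h7 := pvStepB_grid nums m n 7
  have h8 := pvStepB_grid nums m n 8
  norm_num at h0 h1 h2 h3 h4 h5 h6 h7 h8
  rw [h0, h1, h2, h3, h4, h5, h6, h7, h8]
  unfold pvCanon
  refine congrArg List.sum (List.map_congr_left fun i hi =>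
    congrArg List.sum (List.map_congr_left fun j hj => ?_))
  rw [PySem.List.mem_pyRange_one] at hi hj
  by_cases hv0 : pvGv nums i j = 0
  · rw [if_pos hv0, if_pos hv0]
    exact pvGet2_grid m n (fun a b => pvWays nums m n 9 a b) i j
      (by omega) (by omega) (by omega) (by omega)
  · rw [if_neg hv0, if_neg hv0]

theorem pvMain (nums : List (List Int)) : sum_up2 nums = sum_up2_alt nums := by
  rw [pvA_sum, pvB_sum]
-- ===== VERDICT (by name: the statement is the Claim_ definition above) =====
theorem sum_up2_spec : Claim_equal_sum_up2 := by
  intro nums _ _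
  unfold Spec_sum_up2
  exact pvMain nums
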